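-- pv_equiv track=rewrite | github.com/cwalcott/advent-of-code-2025 | day06/day06.py | day06_part2
-- ===== SOURCE A (Python) =====
-- import operator
-- from functools import reduce
--
-- def day06_part2(lines: list[str]) -> int:
--     result = 0
--     numbers = []
--     columns = 0
--     for line in lines:
--         columns = max(columns, len(line))
--
--     for column in range(columns - 1, -1, -1):
--         cleaned = [line[column] for line in lines if column < len(line) and line[column] != ' ']
--         if cleaned:
--             num, op = 0, ''
--             for element in cleaned:
--                 if element.isdigit():
--                     num = (num * 10) + int(element)
--                 elif element == '+' or element == '*':
--                     op = element
--
--             numbers.append(num)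
--             if op == '*':
--                 result += reduce(operator.mul, numbers)
--                 numbers = []
--             elif op == '+':
--                 result += reduce(operator.add, numbers)
--                 numbers = []
--
--     return result
-- ===== SOURCE B (Python) =====
-- def day06_part2(lines: list[str]) -> int:
--     # Parse the grid left-to-right by transposing the padded rows into columns;
--     # an operator column OPENS a group carrying a running accumulator, and the
--     # following operator-less columns fold into it directly (no pending list);
--     # the open group is flushed when the next group opens or at the end.
--     width = max(map(len, lines), default=0)
--     grid = [line.ljust(width) for line in lines]
--     columns = [[row[i] for row in grid] for i in range(width)]
--
--     result = 0
--     current = None  # (op, running value) of the open group, or None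
--     for col in columns:
--         num, op, seen = 0, None, False
--         for ch in col:
--             if ch == ' ':
--                 continue
--             seen = True
--             if ch.isdigit():
--                 num = num * 10 + int(ch)
--             elif ch == '+' or ch == '*':
--                 op = ch
--         if not seen:
--             continue
--         if op is not None:
--             if current is not None:
--                 result += current[1]
--             current = (op, num)
--         elif current is not None:
--             c, acc = current
--             current = (c, acc * num if c == '*' else acc + num)
--     if current is not None:
--         result += current[1]
--     return result
-- ===== Notes on version B (the rewrite author's own statement) =====
-- stated objective: alternative
-- what changed: B scans the grid in the opposite direction with a different group mechanism: it transposes the space-padded rows into columns and walks them left-to-right, where an operator column OPENS a group holding only a running sum/product (no pending number list), each following operator-less column folds its number straight into that accumulator, and a group is flushed into the result when the next group opens or at the end; A instead walks columns right-to-left, collects pending numbers in a list and reduces the whole list when an operator column CLOSES a group. …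
import Mathlib
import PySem

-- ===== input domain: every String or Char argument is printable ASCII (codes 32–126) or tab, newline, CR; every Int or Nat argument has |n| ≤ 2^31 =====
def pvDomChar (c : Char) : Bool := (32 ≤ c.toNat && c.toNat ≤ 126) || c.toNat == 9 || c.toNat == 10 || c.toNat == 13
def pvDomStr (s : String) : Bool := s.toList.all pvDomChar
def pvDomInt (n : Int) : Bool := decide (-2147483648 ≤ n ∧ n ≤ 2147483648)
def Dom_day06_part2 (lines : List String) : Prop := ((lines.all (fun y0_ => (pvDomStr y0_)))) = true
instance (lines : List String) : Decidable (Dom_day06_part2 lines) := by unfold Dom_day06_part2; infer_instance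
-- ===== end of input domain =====

-- B reads the grid in the OPPOSITE direction: it transposes the padded rows into columns and
-- walks them left-to-right, where an operator column OPENS a group carrying a running
-- sum/product (no pending list) that is flushed when the next group opens or at the end;
-- same cost, different algorithmic mechanism ("alternative", not faster).

-- ===== PORT A =====
-- reduce(operator.mul, xs) / reduce(operator.add, xs); A only calls them on nonempty lists
def pvReduceMul : List Int → Int
  | [] => 0
  | x :: xs => xs.foldl (· * ·) x

def pvReduceAdd : List Int → Int
  | [] => 0
  | x :: xs => xs.foldl (· + ·) x

-- [line[column] for line in lines if column < len(line) and line[column] != ' ']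
-- (only called with 0 ≤ column < width, where pyGet? is some iff column < len(line))
def pvCleanA (lines : List String) (column : Int) : List Char :=
  lines.filterMap (fun line =>
    match PySem.List.pyGet? line.toList column with
    | some c => if c ≠ ' ' then some c else none
    | none => none)

-- element.isdigit() / '+'/'*' test and int(element); exact on the printable-ASCII domain
def pvStepA (p : Int × String) (c : Char) : Int × String :=
  if c.isDigit then (p.1 * 10 + ((c.toNat : Int) - 48), p.2)
  else if c = '+' ∨ c = '*' then (p.1, String.ofList [c])
  else p

def pvColStepA (lines : List String) (st : Int × List Int) (column : Int) : Int × List Int :=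
  let cleaned := pvCleanA lines column
  if cleaned ≠ [] then
    let (num, op) := cleaned.foldl pvStepA (0, "")
    let numbers := st.2 ++ [num]
    if op = "*" then (st.1 + pvReduceMul numbers, [])
    else if op = "+" then (st.1 + pvReduceAdd numbers, [])
    else (st.1, numbers)
  else st

def day06_part2 (lines : List String) : Int :=
  let columns : Int := lines.foldl (fun acc line => max acc (line.toList.length : Int)) 0
  ((PySem.List.pyRange (columns - 1) (-1) (-1)).foldl (pvColStepA lines) (0, [])).1

-- ===== PORT B =====
-- line.ljust(width): pad with spaces on the right
def pvPadB (w : Nat) (l : List Char) : List Char := l ++ List.replicate (w - l.length) ' '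

-- [row[i] for row in grid]; every padded row has length ≥ width > i, so row[i] never raises
-- and the pyGetD default is never used
def pvColFnB (grid : List (List Char)) (i : Int) : List Char :=
  grid.map (fun row => PySem.List.pyGetD row i ' ')

-- the inner character loop: state (num, op, seen); spaces are skipped
def pvParseStepB (st : Int × Option Char × Bool) (ch : Char) : Int × Option Char × Bool :=
  if ch = ' ' then st
  else if ch.isDigit then (st.1 * 10 + ((ch.toNat : Int) - 48), st.2.1, true)
  else if ch = '+' ∨ ch = '*' then (st.1, some ch, true)
  else (st.1, st.2.1, true)

-- one column: open a new group on an operator (flushing the previous one),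
-- else fold the number into the open group's running value
def pvColStepB (st : Int × Option (Char × Int)) (col : List Char) : Int × Option (Char × Int) :=
  let p := col.foldl pvParseStepB (0, none, false)
  if p.2.2 then
    match p.2.1 with
    | some c =>
        match st.2 with
        | some cur => (st.1 + cur.2, some (c, p.1))
        | none => (st.1, some (c, p.1))
    | none =>
        match st.2 with
        | some cur => (st.1, some (cur.1, if cur.1 = '*' then cur.2 * p.1 else cur.2 + p.1))
        | none => st
  else st

def day06_part2_alt (lines : List String) : Int :=
  -- width = max(map(len, lines), default=0)
  let width : Int := (PySem.List.max? (lines.map (fun l => (l.toList.length : Int))) (fun x => x)).getD 0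
  let grid := lines.map (fun l => pvPadB width.toNat l.toList)
  let cols := (PySem.List.pyRange 0 width 1).map (pvColFnB grid)
  let fin := cols.foldl pvColStepB (0, none)
  match fin.2 with
  | some cur => fin.1 + cur.2
  | none => fin.1

-- ===== PRECONDITION & SPEC =====
def Spec_day06_part2 (lines : List String) (out : Int) : Prop := out = day06_part2_alt lines
instance (lines : List String) (out : Int) : Decidable (Spec_day06_part2 lines out) := by unfold Spec_day06_part2; infer_instance

-- ===== CLAIM (what is proved, stated in full; the proofs are below) =====
def Claim_equal_day06_part2 : Prop := ∀ (lines : List String), Dom_day06_part2 lines → Spec_day06_part2 lines (day06_part2 lines)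

-- ===== LEMMAS AND PROOFS =====

-- proof-only vocabulary: a column parses to an optional token (number, operator)
def pvOpStr : Option Char → String
  | none => ""
  | some c => String.ofList [c]

def pvOpOK (o : Option Char) : Prop := o = none ∨ o = some '+' ∨ o = some '*'

def pvTok (cs : List Char) : Option (Int × Option Char) :=
  let p := cs.foldl pvParseStepB (0, none, false)
  if p.2.2 then some (p.1, p.2.1) else none

def pvStepATok (st : Int × List Int) (t : Int × Option Char) : Int × List Int :=
  let numbers := st.2 ++ [t.1]
  if t.2 = some '*' then (st.1 + pvReduceMul numbers, [])
  else if t.2 = some '+' then (st.1 + pvReduceAdd numbers, [])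
  else (st.1, numbers)

def pvStepBTok (st : Int × Option (Char × Int)) (t : Int × Option Char) : Int × Option (Char × Int) :=
  match t.2 with
  | some c =>
      match st.2 with
      | some cur => (st.1 + cur.2, some (c, t.1))
      | none => (st.1, some (c, t.1))
  | none =>
      match st.2 with
      | some cur => (st.1, some (cur.1, if cur.1 = '*' then cur.2 * t.1 else cur.2 + t.1))
      | none => st

def pvLift {σ : Type} (f : σ → Int × Option Char → σ) (st : σ) : Option (Int × Option Char) → σ
  | none => st
  | some t => f st t

def pvFinB : Int × Option (Char × Int) → Int
  | (r, some cur) => r + cur.2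
  | (r, none) => r

def pvOpApp (c : Char) (a n : Int) : Int := if c = '*' then a * n else a + n

def pvIsNoneTok (t : Int × Option Char) : Bool := t.2.isNone

-- reference evaluation of a (left-to-right) token list: each operator token opens a group
-- consisting of itself and the following operator-less tokens
def pvSpec : List (Int × Option Char) → Int
  | [] => 0
  | (_, none) :: us => pvSpec us
  | (n, some c) :: us =>
      ((us.takeWhile pvIsNoneTok).map Prod.fst).foldl (pvOpApp c) n
        + pvSpec (us.dropWhile pvIsNoneTok)
termination_by us => us.length
decreasing_by
  · simp only [List.length_cons]; omega
  · simp only [List.length_cons]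
    exact Nat.lt_succ_of_le (List.dropWhile_sublist _).length_le

theorem pv_width_eq (lines : List String) :
    lines.foldl (fun acc line => max acc (line.toList.length : Int)) 0
      = (PySem.List.max? (lines.map (fun l => (l.toList.length : Int))) (fun x => x)).getD 0 := by
  cases lines with
  | nil =>
      rw [List.map_nil, (PySem.List.max?_eq_none_iff ([] : List Int) (fun x => x)).mpr rfl]
      rfl
  | cons l ls =>
      rw [List.map_cons, PySem.List.max?_id_cons, Option.getD_some, List.foldl_map,
        List.foldl_cons]
      have : max (0 : Int) (l.toList.length : Int) = (l.toList.length : Int) :=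
        max_eq_right (Int.natCast_nonneg _)
      rw [this]

theorem pv_clean_eq (lines : List String) (w i : Int)
    (hw : ∀ l ∈ lines, (l.toList.length : Int) ≤ w) (h0 : 0 ≤ i) (hiw : i < w) :
    pvCleanA lines i
      = (pvColFnB (lines.map (fun l => pvPadB w.toNat l.toList)) i).filter (fun c => c ≠ ' ') := by
  induction lines with
  | nil => rfl
  | cons l ls ih =>
      have hw1 : (l.toList.length : Int) ≤ w := hw l List.mem_cons_self
      have hwls : ∀ x ∈ ls, (x.toList.length : Int) ≤ w := fun x hx => hw x (List.mem_cons_of_mem _ hx)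
      have hpadlen : (pvPadB w.toNat l.toList).length = max l.toList.length w.toNat := by
        simp [pvPadB]
        omega
      have hilen : i.toNat < (pvPadB w.toNat l.toList).length := by
        rw [hpadlen]
        omega
      simp only [pvCleanA, pvColFnB, List.map_cons, List.filterMap_cons, List.filter_cons]
      have htail := ih hwls
      simp only [pvCleanA, pvColFnB] at htail
      by_cases hlt : i < (l.toList.length : Int)
      · have hin : i.toNat < l.toList.length := by omega
        have hget : PySem.List.pyGet? l.toList i = some l.toList[i.toNat] := by
          rw [PySem.List.pyGet?_of_nonneg _ h0, List.getElem?_eq_getElem hin]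
        have hpad : PySem.List.pyGetD (pvPadB w.toNat l.toList) i ' ' = l.toList[i.toNat] := by
          rw [PySem.List.pyGetD, PySem.List.pyGet?_of_nonneg _ h0,
            List.getElem?_eq_getElem hilen, Option.getD_some]
          simp only [pvPadB]
          exact List.getElem_append_left hin
        by_cases hsp : l.toList[i.toNat] = ' '
        · simp only [hget, hpad, hsp]
          simpa using htail
        · simp only [hget, hpad]
          simp [hsp]
          simpa using htail
      · have hge : l.toList.length ≤ i.toNat := by omega
        have hget : PySem.List.pyGet? l.toList i = none := by
          rw [PySem.List.pyGet?_of_nonneg _ h0, List.getElem?_eq_none hge]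
        have hpad : PySem.List.pyGetD (pvPadB w.toNat l.toList) i ' ' = ' ' := by
          rw [PySem.List.pyGetD, PySem.List.pyGet?_of_nonneg _ h0,
            List.getElem?_eq_getElem hilen, Option.getD_some]
          simp only [pvPadB]
          rw [List.getElem_append_right hge]
          simp
        simp only [hget, hpad]
        simpa using htail

theorem pv_parse_agree (cs : List Char) (n : Int) (o : Option Char) (s : Bool) (hok : pvOpOK o) :
    (cs.filter (fun c => c ≠ ' ')).foldl pvStepA (n, pvOpStr o)
        = ((cs.foldl pvParseStepB (n, o, s)).1, pvOpStr (cs.foldl pvParseStepB (n, o, s)).2.1)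
      ∧ (cs.foldl pvParseStepB (n, o, s)).2.2 = (s || !(cs.filter (fun c => c ≠ ' ')).isEmpty)
      ∧ pvOpOK (cs.foldl pvParseStepB (n, o, s)).2.1 := by
  induction cs generalizing n o s with
  | nil => exact ⟨rfl, by simp, hok⟩
  | cons ch cs ih =>
      by_cases hsp : ch = ' '
      · subst hsp
        rw [List.filter_cons_of_neg (by simp)]
        have hstep : pvParseStepB (n, o, s) ' ' = (n, o, s) := by simp [pvParseStepB]
        rw [List.foldl_cons, hstep]
        exact ih n o s hok
      · rw [List.filter_cons_of_pos (by simpa using hsp)]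
        rw [List.foldl_cons, List.foldl_cons]
        by_cases hd : ch.isDigit
        · have hB : pvParseStepB (n, o, s) ch = (n * 10 + ((ch.toNat : Int) - 48), o, true) := by
            simp [pvParseStepB, hsp, hd]
          have hA : pvStepA (n, pvOpStr o) ch = (n * 10 + ((ch.toNat : Int) - 48), pvOpStr o) := by
            simp [pvStepA, hd]
          rw [hB, hA]
          obtain ⟨h1, h2, h3⟩ := ih (n * 10 + ((ch.toNat : Int) - 48)) o true hok
          exact ⟨h1, by rw [h2]; simp, h3⟩
        · by_cases hop : ch = '+' ∨ ch = '*'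
          · have hB : pvParseStepB (n, o, s) ch = (n, some ch, true) := by
              simp [pvParseStepB, hsp, hd, hop]
            have hA : pvStepA (n, pvOpStr o) ch = (n, pvOpStr (some ch)) := by
              simp [pvStepA, hd, hop, pvOpStr]
            rw [hB, hA]
            have hok' : pvOpOK (some ch) := by
              rcases hop with rfl | rfl
              · exact Or.inr (Or.inl rfl)
              · exact Or.inr (Or.inr rfl)
            obtain ⟨h1, h2, h3⟩ := ih n (some ch) true hok'
            exact ⟨h1, by rw [h2]; simp, h3⟩
          · have hB : pvParseStepB (n, o, s) ch = (n, o, true) := by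
              simp [pvParseStepB, hsp, hd, hop]
            have hA : pvStepA (n, pvOpStr o) ch = (n, pvOpStr o) := by
              simp [pvStepA, hd, hop]
            rw [hB, hA]
            obtain ⟨h1, h2, h3⟩ := ih n o true hok
            exact ⟨h1, by rw [h2]; simp, h3⟩

theorem pv_tok_opOK (cs : List Char) (t : Int × Option Char) (h : pvTok cs = some t) :
    pvOpOK t.2 := by
  have h3 := (pv_parse_agree cs 0 none false (Or.inl rfl)).2.2
  simp only [pvTok] at h
  split at h
  · cases Option.some.inj h
    exact h3
  · exact absurd h (by simp)

theorem pv_colA_tok (lines : List String) (w : Int)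
    (hw : ∀ l ∈ lines, (l.toList.length : Int) ≤ w) (st : Int × List Int) (i : Int)
    (h0 : 0 ≤ i) (hiw : i < w) :
    pvColStepA lines st i
      = pvLift pvStepATok st (pvTok (pvColFnB (lines.map (fun l => pvPadB w.toNat l.toList)) i)) := by
  have hclean := pv_clean_eq lines w i hw h0 hiw
  set cs := pvColFnB (lines.map (fun l => pvPadB w.toNat l.toList)) i with hcs
  obtain ⟨h1, h2, h3⟩ := pv_parse_agree cs 0 none false (Or.inl rfl)
  have h1' : (cs.filter (fun c => c ≠ ' ')).foldl pvStepA (0, "")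
      = ((cs.foldl pvParseStepB (0, none, false)).1,
         pvOpStr (cs.foldl pvParseStepB (0, none, false)).2.1) := h1
  simp only [pvColStepA, pvTok]
  rw [hclean]
  by_cases hne : cs.filter (fun c => c ≠ ' ') = []
  · have hfalse : (cs.foldl pvParseStepB (0, none, false)).2.2 = false := by
      rw [h2, hne]
      simp
    rw [if_neg (by simpa using hne), hfalse]
    rfl
  · have hie : (cs.filter (fun c => c ≠ ' ')).isEmpty = false := by
      cases hfl : cs.filter (fun c => c ≠ ' ') with
      | nil => exact absurd hfl hne
      | cons a l => rfl
    have htrue : (cs.foldl pvParseStepB (0, none, false)).2.2 = true := by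
      rw [h2, hie]
      rfl
    rw [if_pos (by simpa using hne), h1', htrue]
    rcases h3 with hnone | hplus | hstar
    · rw [hnone]
      simp [pvLift, pvStepATok, pvOpStr]
    · rw [hplus]
      simp [pvLift, pvStepATok, pvOpStr]
    · rw [hstar]
      simp [pvLift, pvStepATok, pvOpStr]

theorem pv_colB_tok (st : Int × Option (Char × Int)) (cs : List Char) :
    pvColStepB st cs = pvLift pvStepBTok st (pvTok cs) := by
  simp only [pvColStepB, pvTok]
  rcases h : cs.foldl pvParseStepB (0, none, false) with ⟨pn, po, ps⟩
  cases ps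
  · simp [pvLift]
  · cases po <;> cases hst : st.2 <;> simp [pvLift, pvStepBTok, hst]

theorem pv_foldl_lift {σ : Type} (f : σ → Int × Option Char → σ)
    (ts : List (Option (Int × Option Char))) (st : σ) :
    ts.foldl (pvLift f) st = ts.reduceOption.foldl f st := by
  induction ts generalizing st with
  | nil => rfl
  | cons t ts ih =>
      cases t with
      | none => simpa [pvLift, List.reduceOption_cons_of_none] using ih st
      | some x => simpa [pvLift, List.reduceOption_cons_of_some] using ih (f st x)

theorem pv_foldl_mul (L : List Int) (a : Int) : L.foldl (· * ·) a = a * L.prod := by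
  induction L generalizing a with
  | nil => simp
  | cons x L ih => simp [List.foldl_cons, ih, List.prod_cons, mul_assoc]

theorem pv_foldl_add (L : List Int) (a : Int) : L.foldl (· + ·) a = a + L.sum := by
  induction L generalizing a with
  | nil => simp
  | cons x L ih => simp [List.foldl_cons, ih, List.sum_cons, add_assoc]

theorem pv_opApp_mul : pvOpApp '*' = fun a n => a * n := by
  funext a n; simp [pvOpApp]

theorem pv_opApp_add : pvOpApp '+' = fun a n => a + n := by
  funext a n; simp [pvOpApp]

theorem pv_reduceMul_concat (l : List Int) (n : Int) :
    pvReduceMul (l ++ [n]) = l.prod * n := by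
  cases l with
  | nil => simp [pvReduceMul]
  | cons x xs =>
      simp only [List.cons_append, pvReduceMul, List.foldl_append, List.foldl_cons,
        List.foldl_nil, pv_foldl_mul, List.prod_cons]

theorem pv_reduceAdd_concat (l : List Int) (n : Int) :
    pvReduceAdd (l ++ [n]) = l.sum + n := by
  cases l with
  | nil => simp [pvReduceAdd]
  | cons x xs =>
      simp only [List.cons_append, pvReduceAdd, List.foldl_append, List.foldl_cons,
        List.foldl_nil, pv_foldl_add, List.sum_cons]

theorem pv_reduceMul_rev (L : List Int) (n : Int) :
    pvReduceMul (L.reverse ++ [n]) = L.foldl (pvOpApp '*') n := by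
  rw [pv_reduceMul_concat, pv_opApp_mul, pv_foldl_mul, List.prod_reverse]
  ring

theorem pv_reduceAdd_rev (L : List Int) (n : Int) :
    pvReduceAdd (L.reverse ++ [n]) = L.foldl (pvOpApp '+') n := by
  rw [pv_reduceAdd_concat, pv_opApp_add, pv_foldl_add, List.sum_reverse]
  ring

theorem pv_spec_dropWhile (us : List (Int × Option Char)) :
    pvSpec (us.dropWhile pvIsNoneTok) = pvSpec us := by
  induction us with
  | nil => rfl
  | cons t us ih =>
      obtain ⟨n, o⟩ := t
      cases o with
      | none =>
          rw [List.dropWhile_cons_of_pos (by simp [pvIsNoneTok])]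
          rw [ih]
          simp [pvSpec]
      | some c =>
          rw [List.dropWhile_cons_of_neg (by simp [pvIsNoneTok])]

-- A's right-to-left accumulation, characterised: result = reference value, pending numbers =
-- the numbers of the leading operator-less tokens, reversed
theorem pv_A_char (us : List (Int × Option Char)) (hok : ∀ t ∈ us, pvOpOK t.2) :
    us.foldr (fun t st => pvStepATok st t) (0, [])
      = (pvSpec us, ((us.takeWhile pvIsNoneTok).map Prod.fst).reverse) := by
  induction us with
  | nil => simp [pvSpec]
  | cons t us ih =>
      obtain ⟨n, o⟩ := t
      have ihok : ∀ t ∈ us, pvOpOK t.2 := fun t ht => hok t (List.mem_cons_of_mem _ ht)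
      rw [List.foldr_cons, ih ihok]
      cases o with
      | none =>
          simp only [pvStepATok]
          rw [List.takeWhile_cons_of_pos (by simp [pvIsNoneTok])]
          simp [pvSpec]
      | some c =>
          have hc : c = '+' ∨ c = '*' := by
            have := hok (n, some c) List.mem_cons_self
            rcases this with h | h | h
            · exact absurd h (by simp)
            · exact Or.inl (Option.some.inj h)
            · exact Or.inr (Option.some.inj h)
          rw [List.takeWhile_cons_of_neg (by simp [pvIsNoneTok])]
          rcases hc with rfl | rfl
          · simp only [pvStepATok, show ((some '+' : Option Char) = some '*') = False by simp,
              if_false, if_true]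
            rw [pv_reduceAdd_rev, pvSpec, ← pv_spec_dropWhile us]
            exact Prod.ext (by ring) (by simp)
          · simp only [pvStepATok, reduceIte]
            rw [pv_reduceMul_rev, pvSpec, ← pv_spec_dropWhile us]
            exact Prod.ext (by ring) (by simp)

-- B's left-to-right accumulation with flush, characterised
theorem pv_B_char (us : List (Int × Option Char)) (st : Int × Option (Char × Int)) :
    pvFinB (us.foldl pvStepBTok st)
      = match st.2 with
        | none => st.1 + pvSpec us
        | some cur =>
            st.1 + ((us.takeWhile pvIsNoneTok).map Prod.fst).foldl (pvOpApp cur.1) cur.2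
              + pvSpec (us.dropWhile pvIsNoneTok) := by
  induction us generalizing st with
  | nil =>
      obtain ⟨r, cur⟩ := st
      cases cur with
      | none => simp [pvFinB, pvSpec]
      | some cur => simp [pvFinB, pvSpec]
  | cons t us ih =>
      obtain ⟨n, o⟩ := t
      obtain ⟨r, cur⟩ := st
      cases o with
      | none =>
          rw [List.takeWhile_cons_of_pos (by simp [pvIsNoneTok]),
            List.dropWhile_cons_of_pos (by simp [pvIsNoneTok])]
          cases cur with
          | none =>
              rw [List.foldl_cons]
              have hstep : pvStepBTok (r, none) (n, none) = (r, none) := rfl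
              rw [hstep, ih]
              simp [pvSpec]
          | some cur =>
              obtain ⟨c, a⟩ := cur
              rw [List.foldl_cons]
              have hstep : pvStepBTok (r, some (c, a)) (n, none) = (r, some (c, pvOpApp c a n)) := by
                simp [pvStepBTok, pvOpApp]
              rw [hstep, ih]
              simp
      | some c' =>
          rw [List.takeWhile_cons_of_neg (by simp [pvIsNoneTok]),
            List.dropWhile_cons_of_neg (by simp [pvIsNoneTok])]
          cases cur with
          | none =>
              rw [List.foldl_cons]
              have hstep : pvStepBTok (r, none) (n, some c') = (r, some (c', n)) := rfl
              rw [hstep, ih]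
              simp only [pvSpec]
              ring
          | some cur =>
              obtain ⟨c, a⟩ := cur
              rw [List.foldl_cons]
              have hstep : pvStepBTok (r, some (c, a)) (n, some c') = (r + a, some (c', n)) := rfl
              rw [hstep, ih]
              simp only [pvSpec, List.map_nil, List.foldl_nil]
              ring

-- ===== VERDICT (by name: the statement is the Claim_ definition above) =====
theorem pv_reduceOption_reverse {α : Type} (l : List (Option α)) :
    l.reverse.reduceOption = l.reduceOption.reverse := by
  simp [List.reduceOption]

theorem pv_mem_of_mem_reduceOption {α : Type} (l : List (Option α)) (x : α)
    (h : x ∈ l.reduceOption) : some x ∈ l := by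
  simpa [List.reduceOption, List.mem_filterMap] using h

-- ===== VERDICT (by name: the statement is the Claim_ definition above) =====
theorem day06_part2_spec : Claim_equal_day06_part2 := by
  intro lines _
  simp only [Spec_day06_part2, day06_part2, day06_part2_alt]
  rw [← pv_width_eq lines]
  set w := lines.foldl (fun acc line => max acc ((line.toList.length : Int))) 0 with hwdef
  have hw0 : 0 ≤ w := (PySem.List.le_foldl_max_int lines (fun l => (l.toList.length : Int)) 0).1
  have hwl : ∀ l ∈ lines, (l.toList.length : Int) ≤ w :=
    (PySem.List.le_foldl_max_int lines (fun l => (l.toList.length : Int)) 0).2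
  set grid := lines.map (fun l => pvPadB w.toNat l.toList) with hgrid
  set tok := fun x => pvTok (pvColFnB grid x) with htok
  set us := ((PySem.List.pyRange 0 w 1).map tok).reduceOption with hus
  -- A side
  have hr : PySem.List.pyRange (w - 1) (-1) (-1) = (PySem.List.pyRange 0 w 1).reverse := by
    rw [PySem.List.pyRange_neg_one_eq_reverse]
    norm_num
  have hstepA : ∀ (st : Int × List Int), ∀ x ∈ (PySem.List.pyRange 0 w 1).reverse,
      pvColStepA lines st x = pvLift pvStepATok st (tok x) := by
    intro st x hx
    rw [List.mem_reverse] at hx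
    obtain ⟨hx0, hxw⟩ := PySem.List.mem_pyRange_one.mp hx
    exact pv_colA_tok lines w hwl st x hx0 hxw
  have hok : ∀ t ∈ us, pvOpOK t.2 := by
    intro t ht
    have := pv_mem_of_mem_reduceOption _ _ ht
    obtain ⟨x, -, hx⟩ := List.mem_map.mp this
    exact pv_tok_opOK _ _ hx
  have hA : ((PySem.List.pyRange (w - 1) (-1) (-1)).foldl (pvColStepA lines) (0, [])).1
      = pvSpec us := by
    rw [hr, PySem.List.foldl_congr_mem _ _ _ _ hstepA, ← List.foldl_map,
      List.map_reverse, pv_foldl_lift, pv_reduceOption_reverse, ← hus,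
      List.foldl_reverse, pv_A_char us hok]
  rw [hA]
  -- B side
  have hBfun : pvColStepB = fun st cs => pvLift pvStepBTok st (pvTok cs) :=
    funext fun st => funext fun cs => pv_colB_tok st cs
  have hB : ((PySem.List.pyRange 0 w 1).map (pvColFnB grid)).foldl pvColStepB (0, none)
      = us.foldl pvStepBTok (0, none) := by
    rw [hBfun, List.foldl_map, ← List.foldl_map (f := fun x => pvTok (pvColFnB grid x)),
      pv_foldl_lift]
  rw [hB]
  have hfin := pv_B_char us (0, none)
  rcases hp : us.foldl pvStepBTok (0, none) with ⟨r, cur⟩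
  rw [hp] at hfin
  cases cur with
  | none =>
      simp only [pvFinB] at hfin
      simpa using hfin.symm
  | some cur =>
      simp only [pvFinB] at hfin
      simpa using hfin.symm
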